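-- pv_equiv track=rewrite | github.com/Infinidrix/competitive-programming | Day 21/q2.py | find_removable
-- ===== SOURCE A (Python) =====
-- def find_upper(lookup_array, item, start_point = 0):
-- 	for i in range(start_point, len(lookup_array)):
-- 		if lookup_array[i] > item:
-- 			return i
-- 	return -1
--
-- def find_removable(verse_length, time_limit):
-- 	sum_array = []
-- 	summed = 0
-- 	for i in verse_length:
-- 		summed += i
-- 		sum_array.append(summed)
--
-- 	final_index = find_upper(sum_array, time_limit)
--
-- 	if final_index == -1:
-- 		return 0
-- 	max_possible = final_index + 1
-- 	max_index_remove = -1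
-- 	for i in range(final_index+1):
-- 		index_reached = find_upper(sum_array, time_limit + verse_length[i], final_index)
-- 		if index_reached > max_possible:
-- 			max_possible = index_reached
-- 			max_index_remove = i
-- 		elif index_reached == -1:
-- 			return i + 1
-- 	if max_index_remove == -1:
-- 		return 0
-- 	return max_index_remove + 1
-- ===== SOURCE B (Python) =====
-- def find_removable(verse_length, time_limit):
--     prefix = []
--     s = 0
--     for v in verse_length:
--         s += v
--         prefix.append(s)
--     n = len(prefix)
--     f = -1
--     for j in range(n):
--         if prefix[j] > time_limit:
--             f = j
--             break
--     if f == -1: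
--         return 0
--     # offline two-pointer sweep: process candidate removals in ascending
--     # verse-length order so a single monotone pointer answers all queries
--     order = sorted(range(f + 1), key=lambda i: verse_length[i])
--     reach = {}
--     j = f
--     for i in order:
--         t = time_limit + verse_length[i]
--         while j < n and prefix[j] <= t:
--             j += 1
--         reach[i] = j if j < n else -1
--     max_possible = f + 1
--     max_index_remove = -1
--     for i in range(f + 1):
--         r = reach[i]
--         if r > max_possible:
--             max_possible = r
--             max_index_remove = i
--         elif r == -1:
--             return i + 1
--     if max_index_remove == -1:
--         return 0
--     return max_index_remove + 1
-- ===== Notes on version B (the rewrite author's own statement) =====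
-- stated objective: alternative
-- what changed: A re-scans the prefix-sum array linearly for every removable candidate; B sorts the candidates by verse length once and answers all reachability queries with a single monotone two-pointer sweep over the prefix sums (offline query answering), trading A's worst-case quadratic rescans for an O(n log n) bound; on the random timing inputs both run in comparable linear-ish time.
import Mathlib
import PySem

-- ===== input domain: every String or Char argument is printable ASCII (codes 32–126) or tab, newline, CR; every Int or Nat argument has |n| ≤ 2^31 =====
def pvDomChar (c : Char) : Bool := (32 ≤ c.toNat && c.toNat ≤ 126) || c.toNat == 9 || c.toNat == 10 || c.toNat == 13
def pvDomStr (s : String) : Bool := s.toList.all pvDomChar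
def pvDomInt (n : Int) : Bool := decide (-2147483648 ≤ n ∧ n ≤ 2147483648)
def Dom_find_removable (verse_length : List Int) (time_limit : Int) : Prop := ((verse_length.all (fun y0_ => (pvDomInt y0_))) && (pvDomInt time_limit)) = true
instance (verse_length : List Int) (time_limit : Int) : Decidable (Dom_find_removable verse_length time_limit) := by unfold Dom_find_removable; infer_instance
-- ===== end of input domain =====

-- B replaces A's per-candidate linear rescans by one sort of the candidates plus a single
-- monotone two-pointer sweep over the prefix sums (offline query answering); exact same results.

-- ===== PORT A =====
-- for i in range(start, len): if lookup[i] > item: return i ;; return -1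
-- (indices come from range(start, len) with 0 ≤ start, so lookup[i] never raises; pyGetD is exact here)
def find_upper_go (lookup : List Int) (item : Int) : List Int → Int
  | [] => -1
  | i :: rest =>
    if PySem.List.pyGetD lookup i 0 > item then i else find_upper_go lookup item rest

def find_upper (lookup_array : List Int) (item : Int) (start_point : Int) : Int :=
  find_upper_go lookup_array item (PySem.List.pyRange start_point (lookup_array.length : Int) 1)

-- running-sum accumulation: summed += i; sum_array.append(summed)
def sums_go : List Int → Int → List Int → List Int
  | [], _, acc => acc
  | i :: rest, summed, acc => sums_go rest (summed + i) (acc ++ [summed + i])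

-- the main for-loop with its early return; the [] case carries A's code after the loop
def loop_a (sum_array verse : List Int) (tl fi : Int) : List Int → Int → Int → Int
  | [], _, mir => if mir = -1 then 0 else mir + 1
  | i :: rest, mp, mir =>
    let ir := find_upper sum_array (tl + PySem.List.pyGetD verse i 0) fi
    if ir > mp then loop_a sum_array verse tl fi rest ir i
    else if ir = -1 then i + 1
    else loop_a sum_array verse tl fi rest mp mir

def find_removable (verse_length : List Int) (time_limit : Int) : Int :=
  let sum_array := sums_go verse_length 0 []
  let final_index := find_upper sum_array time_limit 0
  if final_index = -1 then 0
  else loop_a sum_array verse_length time_limit final_index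
         (PySem.List.pyRange 0 (final_index + 1) 1) (final_index + 1) (-1)

-- ===== PORT B =====
-- prefix sums built by a fold (s += v; prefix.append(s))
def b_prefix (verse : List Int) : List Int :=
  (verse.foldl (fun (p : List Int × Int) v => (p.1 ++ [p.2 + v], p.2 + v)) ([], 0)).1

-- for j in range(n): if prefix[j] > time_limit: f = j; break  (f = -1 if no break)
def first_over (pre : List Int) (tl : Int) : List Int → Int
  | [] => -1
  | j :: rest => if PySem.List.pyGetD pre j 0 > tl then j else first_over pre tl rest

-- while j < n and prefix[j] <= t: j += 1
def sweep_advance (pre : List Int) (t n j : Int) : Int :=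
  if h : j < n then
    if PySem.List.pyGetD pre j 0 ≤ t then sweep_advance pre t n (j + 1) else j
  else j
termination_by (n - j).toNat
decreasing_by omega

-- for i in order: advance j; reach[i] = j if j < n else -1  (reach is a dict)
def sweep_go (pre verse : List Int) (tl n : Int) :
    List Int → Int → PySem.Dict Int Int → PySem.Dict Int Int
  | [], _, reach => reach
  | i :: rest, j, reach =>
    let t := tl + PySem.List.pyGetD verse i 0
    let j' := sweep_advance pre t n j
    sweep_go pre verse tl n rest j' (reach.insert i (if j' < n then j' else -1))

-- final replay loop; reach[i] always present, so getD is exact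
def loop_b (reach : PySem.Dict Int Int) : List Int → Int → Int → Int
  | [], _, mir => if mir = -1 then 0 else mir + 1
  | i :: rest, mp, mir =>
    let r := reach.getD i 0
    if r > mp then loop_b reach rest r i
    else if r = -1 then i + 1
    else loop_b reach rest mp mir

def find_removable_alt (verse_length : List Int) (time_limit : Int) : Int :=
  let pre := b_prefix verse_length
  let n : Int := (pre.length : Int)
  let f := first_over pre time_limit (PySem.List.pyRange 0 n 1)
  if f = -1 then 0
  else
    let order := PySem.List.sorted (PySem.List.pyRange 0 (f + 1) 1)
                   (fun i => PySem.List.pyGetD verse_length i 0) false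
    let reach := sweep_go pre verse_length time_limit n order f PySem.Dict.empty
    loop_b reach (PySem.List.pyRange 0 (f + 1) 1) (f + 1) (-1)

-- ===== PRECONDITION & SPEC =====
def Spec_find_removable (verse_length : List Int) (time_limit : Int) (out : Int) : Prop := out = find_removable_alt verse_length time_limit
instance (verse_length : List Int) (time_limit : Int) (out : Int) : Decidable (Spec_find_removable verse_length time_limit out) := by unfold Spec_find_removable; infer_instance

-- ===== CLAIM (what is proved, stated in full; the proofs are below) =====
def Claim_equal_find_removable : Prop := ∀ (verse_length : List Int) (time_limit : Int), Dom_find_removable verse_length time_limit → Spec_find_removable verse_length time_limit (find_removable verse_length time_limit)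

-- ===== LEMMAS AND PROOFS =====

-- A's and B's prefix-sum constructions agree
theorem sums_go_eq_foldl (vs : List Int) (s : Int) (acc : List Int) :
    sums_go vs s acc = (vs.foldl (fun (p : List Int × Int) v => (p.1 ++ [p.2 + v], p.2 + v)) (acc, s)).1 := by
  induction vs generalizing s acc with
  | nil => rfl
  | cons v vs ih => simp [sums_go, List.foldl, ih]

-- A's find_upper scan and B's first-break scan are the same scan
theorem first_over_eq (pre : List Int) (tl : Int) (ixs : List Int) :
    first_over pre tl ixs = find_upper_go pre tl ixs := by
  induction ixs with
  | nil => rfl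
  | cons j rest ih => simp [first_over, find_upper_go, ih]

-- find_upper_go returns -1 or a member of the scanned index list
theorem find_upper_go_mem (pre : List Int) (t : Int) (ixs : List Int) :
    find_upper_go pre t ixs = -1 ∨ find_upper_go pre t ixs ∈ ixs := by
  induction ixs with
  | nil => exact Or.inl rfl
  | cons j rest ih =>
    by_cases h : PySem.List.pyGetD pre j 0 > t
    · simp [find_upper_go, h]
    · simpa [find_upper_go, h] using ih.imp id Or.inr

-- the scan from f equals the scan from j when all of [f, j) is ≤ t
theorem find_upper_go_skip (pre : List Int) (t n f j : Int)
    (hfj : f ≤ j) (hjn : j ≤ n)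
    (hsk : ∀ k, f ≤ k → k < j → PySem.List.pyGetD pre k 0 ≤ t) :
    find_upper_go pre t (PySem.List.pyRange f n 1) = find_upper_go pre t (PySem.List.pyRange j n 1) := by
  have key : ∀ m : Nat, ∀ f : Int, (j - f).toNat = m → f ≤ j →
      (∀ k, f ≤ k → k < j → PySem.List.pyGetD pre k 0 ≤ t) →
      find_upper_go pre t (PySem.List.pyRange f n 1) = find_upper_go pre t (PySem.List.pyRange j n 1) := by
    intro m
    induction m with
    | zero =>
      intro f hm hfj _
      have : f = j := by omega
      subst this; rfl
    | succ m ih =>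
      intro f hm hfj hsk
      have hflt : f < j := by omega
      rw [PySem.List.pyRange_one_cons (by omega : f < n)]
      have hle : ¬ (PySem.List.pyGetD pre f 0 > t) := not_lt.2 (hsk f le_rfl hflt)
      simp only [find_upper_go, if_neg hle]
      exact ih (f + 1) (by omega) (by omega) (fun k hk1 hk2 => hsk k (by omega) hk2)
  exact key (j - f).toNat f rfl hfj hsk

-- sweep_advance stays within [j, n] (for j ≤ n) and skips only ≤ t entries
theorem sweep_advance_props (pre : List Int) (t n j : Int) (hjn : j ≤ n) :
    j ≤ sweep_advance pre t n j ∧ sweep_advance pre t n j ≤ n ∧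
    (∀ k, j ≤ k → k < sweep_advance pre t n j → PySem.List.pyGetD pre k 0 ≤ t) := by
  have key : ∀ m : Nat, ∀ j : Int, (n - j).toNat = m → j ≤ n →
      j ≤ sweep_advance pre t n j ∧ sweep_advance pre t n j ≤ n ∧
      (∀ k, j ≤ k → k < sweep_advance pre t n j → PySem.List.pyGetD pre k 0 ≤ t) := by
    intro m
    induction m with
    | zero =>
      intro j hm hjn
      have hnlt : ¬ j < n := by omega
      have hstep : sweep_advance pre t n j = j := by rw [sweep_advance]; simp [hnlt]
      rw [hstep]
      exact ⟨le_rfl, hjn, fun k hk1 hk2 => absurd (lt_of_le_of_lt hk1 hk2) (lt_irrefl _)⟩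
    | succ m ih =>
      intro j hm hjn
      by_cases hj : j < n
      · by_cases ht : PySem.List.pyGetD pre j 0 ≤ t
        · have hstep : sweep_advance pre t n j = sweep_advance pre t n (j + 1) := by
            rw [sweep_advance]; simp [hj, ht]
          obtain ⟨h1, h2, h3⟩ := ih (j + 1) (by omega) (by omega)
          rw [hstep]
          refine ⟨by omega, h2, fun k hk1 hk2 => ?_⟩
          rcases eq_or_lt_of_le hk1 with rfl | hk
          · exact ht
          · exact h3 k (by omega) hk2
        · have hstep : sweep_advance pre t n j = j := by rw [sweep_advance]; simp [hj, ht]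
          rw [hstep]
          exact ⟨le_rfl, hjn, fun k hk1 hk2 => absurd (lt_of_le_of_lt hk1 hk2) (lt_irrefl _)⟩
      · have hstep : sweep_advance pre t n j = j := by rw [sweep_advance]; simp [hj]
        rw [hstep]
        exact ⟨le_rfl, hjn, fun k hk1 hk2 => absurd (lt_of_le_of_lt hk1 hk2) (lt_irrefl _)⟩
  exact key (n - j).toNat j rfl hjn

-- the pointer result is exactly A's linear scan from j
theorem sweep_advance_eq_scan (pre : List Int) (t n j : Int) :
    find_upper_go pre t (PySem.List.pyRange j n 1) =
      (if sweep_advance pre t n j < n then sweep_advance pre t n j else -1) := by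
  have key : ∀ m : Nat, ∀ j : Int, (n - j).toNat = m →
      find_upper_go pre t (PySem.List.pyRange j n 1) =
        (if sweep_advance pre t n j < n then sweep_advance pre t n j else -1) := by
    intro m
    induction m with
    | zero =>
      intro j hm
      have hnlt : ¬ j < n := by omega
      have hstep : sweep_advance pre t n j = j := by rw [sweep_advance]; simp [hnlt]
      rw [PySem.List.pyRange_one_eq_nil (by omega), hstep]
      simp [find_upper_go, hnlt]
    | succ m ih =>
      intro j hm
      have hj : j < n := by omega
      rw [PySem.List.pyRange_one_cons hj]
      by_cases ht : PySem.List.pyGetD pre j 0 ≤ t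
      · have hstep : sweep_advance pre t n j = sweep_advance pre t n (j + 1) := by
          rw [sweep_advance]; simp [hj, ht]
        simp only [find_upper_go, if_neg (not_lt.2 ht)]
        rw [hstep]
        exact ih (j + 1) (by omega)
      · have hstep : sweep_advance pre t n j = j := by rw [sweep_advance]; simp [hj, ht]
        simp only [find_upper_go, if_pos (lt_of_not_ge ht)]
        rw [hstep, if_pos hj]
  exact key (n - j).toNat j rfl

-- sweep_go never touches keys outside the processed list
theorem sweep_go_preserve (pre verse : List Int) (tl n : Int) (rest : List Int) (j : Int)
    (reach : PySem.Dict Int Int) (i0 : Int) (h : i0 ∉ rest) :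
    (sweep_go pre verse tl n rest j reach).getD i0 0 = reach.getD i0 0 := by
  induction rest generalizing j reach with
  | nil => rfl
  | cons i rest ih =>
    simp only [List.mem_cons, not_or] at h
    simp only [sweep_go]
    rw [ih _ _ h.2, PySem.Dict.getD_insert]
    simp [h.1]

-- main sweep invariant: every processed candidate's reach equals A's scan from f
theorem sweep_go_correct (pre verse : List Int) (tl n f : Int) :
    ∀ (rest : List Int) (j : Int) (reach : PySem.Dict Int Int),
      f ≤ j → j ≤ n →
      (∀ k, f ≤ k → k < j → ∀ i ∈ rest, PySem.List.pyGetD pre k 0 ≤ tl + PySem.List.pyGetD verse i 0) →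
      rest.Pairwise (fun a b => PySem.List.pyGetD verse a 0 ≤ PySem.List.pyGetD verse b 0) →
      rest.Nodup →
      ∀ i0 ∈ rest,
        (sweep_go pre verse tl n rest j reach).getD i0 0 =
          find_upper_go pre (tl + PySem.List.pyGetD verse i0 0) (PySem.List.pyRange f n 1) := by
  intro rest
  induction rest with
  | nil => intro j reach _ _ _ _ _ i0 h; exact absurd h (List.not_mem_nil)
  | cons i rest ih =>
    intro j reach hfj hjn hinv hpw hnd i0 hmem
    obtain ⟨ha1, ha2, ha3⟩ :=
      sweep_advance_props pre (tl + PySem.List.pyGetD verse i 0) n j hjn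
    simp only [sweep_go]
    rcases List.mem_cons.mp hmem with rfl | hmem'
    · have hnotin : i0 ∉ rest := (List.nodup_cons.mp hnd).1
      rw [sweep_go_preserve _ _ _ _ _ _ _ _ hnotin, PySem.Dict.getD_insert, if_pos rfl]
      rw [find_upper_go_skip pre (tl + PySem.List.pyGetD verse i0 0) n f j hfj hjn
            (fun k hk1 hk2 => hinv k hk1 hk2 i0 (List.mem_cons_self ..))]
      exact (sweep_advance_eq_scan pre (tl + PySem.List.pyGetD verse i0 0) n j).symm
    · refine ih (sweep_advance pre (tl + PySem.List.pyGetD verse i 0) n j) _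
        (le_trans hfj ha1) ha2 ?_ (List.pairwise_cons.mp hpw).2 (List.nodup_cons.mp hnd).2 i0 hmem'
      intro k hk1 hk2 i1 hi1
      by_cases hkj : k < j
      · exact hinv k hk1 hkj i1 (List.mem_cons_of_mem _ hi1)
      · have h1 := ha3 k (by omega) hk2
        have h2 : PySem.List.pyGetD verse i 0 ≤ PySem.List.pyGetD verse i1 0 :=
          (List.pairwise_cons.mp hpw).1 i1 hi1
        omega

-- the two replay loops agree once reach matches A's scans
theorem loops_eq (pre verse : List Int) (tl f : Int) (reach : PySem.Dict Int Int) :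
    ∀ (ixs : List Int) (mp mir : Int),
      (∀ i ∈ ixs, reach.getD i 0 = find_upper pre (tl + PySem.List.pyGetD verse i 0) f) →
      loop_a pre verse tl f ixs mp mir = loop_b reach ixs mp mir := by
  intro ixs
  induction ixs with
  | nil => intro mp mir _; rfl
  | cons i rest ih =>
    intro mp mir h
    have hi := h i (List.mem_cons_self ..)
    simp only [loop_a, loop_b, ← hi]
    split_ifs <;> first | rfl | exact ih _ _ (fun i hi => h i (List.mem_cons_of_mem _ hi))

-- ===== VERDICT (by name: the statement is the Claim_ definition above) =====
theorem find_removable_spec : Claim_equal_find_removable := by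
  intro verse tl _
  unfold Spec_find_removable
  simp only [find_removable, find_removable_alt]
  have hpre : sums_go verse 0 [] = b_prefix verse := by
    rw [sums_go_eq_foldl]; rfl
  rw [hpre]
  rw [show find_upper (b_prefix verse) tl 0
        = first_over (b_prefix verse) tl
            (PySem.List.pyRange 0 ((b_prefix verse).length : Int) 1) from
      (first_over_eq _ _ _).symm]
  set pre := b_prefix verse with hpredef
  set F := first_over pre tl (PySem.List.pyRange 0 ((pre.length : Int)) 1) with hF
  by_cases hF1 : F = -1
  · simp [hF1]
  · simp only [if_neg hF1]
    have hFmem : F ∈ PySem.List.pyRange 0 ((pre.length : Int)) 1 := by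
      rcases find_upper_go_mem pre tl (PySem.List.pyRange 0 ((pre.length : Int)) 1) with h | h
      · exact absurd (hF.trans (first_over_eq _ _ _) |>.trans h) hF1
      · rw [hF, first_over_eq]; exact h
    have hFb : 0 ≤ F ∧ F < (pre.length : Int) := (PySem.List.mem_pyRange_one).mp hFmem
    apply loops_eq
    intro i hi
    have hsorted := PySem.List.sorted_pairwise
      (xs := PySem.List.pyRange 0 (F + 1) 1) (key := fun i => PySem.List.pyGetD verse i 0)
    have hnodup : (PySem.List.sorted (PySem.List.pyRange 0 (F + 1) 1)
        (fun i => PySem.List.pyGetD verse i 0) false).Nodup :=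
      (PySem.List.sorted_perm _ _ _).nodup_iff.mpr (PySem.List.nodup_pyRange_one _ _)
    have himem : i ∈ PySem.List.sorted (PySem.List.pyRange 0 (F + 1) 1)
        (fun i => PySem.List.pyGetD verse i 0) false :=
      (PySem.List.mem_sorted _ _ _ _).mpr hi
    have := sweep_go_correct pre verse tl ((pre.length : Int)) F _ F PySem.Dict.empty
      le_rfl (le_of_lt hFb.2)
      (fun k hk1 hk2 _ _ => absurd (lt_of_le_of_lt hk1 hk2) (lt_irrefl _))
      hsorted hnodup i himem
    exact this
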